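-- pv_equiv track=rewrite | github.com/LorenzoGiacobbe/CodiceTesiMagistrale | correlations/corr_matrix.py | create_HW
-- ===== SOURCE A (Python) =====
-- def my_and(i1, i2):
-- 	return i1 & i2
--
-- def create_HW(len):
--     il = list()
--     x = list()
--     corr_func_a = list()
--     corr_func_b = list()
--     corr_func_ab = list()
--
--     for i in range(0, len):
--         s = format(i, '04b')
--         il.append(s)
--
--     for i in range(len):
--         for j in range(len):
--             post_a = int(il[j][0])
--             post_b = int(il[j][1])
--             corr_func_a.append(post_a)
--             corr_func_b.append(post_b)
--             corr_func_ab.append(my_and(post_a, post_b))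
--
--     x.append(corr_func_a)
--     x.append(corr_func_b)
--     x.append(corr_func_ab)
--
--     return x
-- ===== SOURCE B (Python) =====
-- def create_HW(len):
--     def top_bits(j):
--         s = format(j, '04b')
--         a = 1 if s[0] == '1' else 0
--         b = 1 if s[1] == '1' else 0
--         return (a, b)
--     pairs = [top_bits(j) for j in range(len)]
--     row_a = [a for a, _ in pairs]
--     row_b = [b for _, b in pairs]
--     row_ab = [a * b for a, b in pairs]
--     return [row_a * len, row_b * len, row_ab * len]
-- ===== Notes on version B (the rewrite author's own statement) =====
-- stated objective: alternative
-- what changed: Replaces the nested len-by-len loop that recomputes int(s[0]), int(s[1]) and my_and for every (i,j) pair with a single comprehension building one (a,b) pair per j via character comparison (no int() parsing, product instead of bitwise-and), then three projections and list tiling produce the outputs.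
import Mathlib
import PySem

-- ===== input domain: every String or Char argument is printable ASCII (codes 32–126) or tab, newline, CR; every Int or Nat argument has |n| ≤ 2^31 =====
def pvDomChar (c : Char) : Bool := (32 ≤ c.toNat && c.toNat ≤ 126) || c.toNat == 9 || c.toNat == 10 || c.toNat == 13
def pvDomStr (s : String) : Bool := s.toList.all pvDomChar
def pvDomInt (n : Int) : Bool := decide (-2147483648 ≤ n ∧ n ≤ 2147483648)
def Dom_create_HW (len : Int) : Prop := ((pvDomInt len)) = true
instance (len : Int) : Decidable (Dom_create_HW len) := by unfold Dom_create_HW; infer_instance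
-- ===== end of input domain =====

-- B replaces A's len×len nested loop (int-parsing two chars and my_and per pair) by one
-- comprehension producing a (bit,bit) pair per j via char comparison and products, then tiling.

-- ===== PORT A =====
-- format(i, '04b') for i ≥ 0 (the only way A calls it): binary digits left-padded with '0' to width 4
def pvFmt04b (i : Int) : List Char :=
  let bits := PySem.Int.toBinChars i
  List.replicate (4 - bits.length) '0' ++ bits

def my_and (i1 i2 : Int) : Int := PySem.Int.band i1 i2

def create_HW (len : Int) : List (List Int) :=
  -- first loop: il.append(format(i, '04b'))
  let il : List (List Char) :=
    (PySem.List.pyRange 0 len 1).foldl (fun il i => il ++ [pvFmt04b i]) []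
  -- nested i/j loops appending to the three accumulators (il[j] is always in range, so pyGetD's default is unreachable)
  let st : List Int × List Int × List Int :=
    (PySem.List.pyRange 0 len 1).foldl (fun st _i =>
      (PySem.List.pyRange 0 len 1).foldl (fun st j =>
        let s := PySem.List.pyGetD il j []
        let post_a := (PySem.Int.ofChars? [PySem.List.pyGetD s 0 ' ']).getD 0
        let post_b := (PySem.Int.ofChars? [PySem.List.pyGetD s 1 ' ']).getD 0
        (st.1 ++ [post_a], st.2.1 ++ [post_b], st.2.2 ++ [my_and post_a post_b])) st)
      ([], [], [])
  [st.1, st.2.1, st.2.2]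

-- ===== PORT B =====
-- helper top_bits(j): the two leading chars of format(j,'04b') read as bits by comparison with '1'
def pvTopBits (j : Int) : Int × Int :=
  let s := pvFmt04b j
  ((if PySem.List.pyGetD s 0 ' ' = '1' then 1 else 0),
   (if PySem.List.pyGetD s 1 ' ' = '1' then 1 else 0))

def create_HW_alt (len : Int) : List (List Int) :=
  let pairs := (PySem.List.pyRange 0 len 1).map pvTopBits
  let row_a := pairs.map (fun p => p.1)
  let row_b := pairs.map (fun p => p.2)
  let row_ab := pairs.map (fun p => p.1 * p.2)
  [PySem.List.pyRepeat row_a len, PySem.List.pyRepeat row_b len, PySem.List.pyRepeat row_ab len]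

-- ===== PRECONDITION & SPEC =====
def Spec_create_HW (len : Int) (out : List (List Int)) : Prop := out = create_HW_alt len
instance (len : Int) (out : List (List Int)) : Decidable (Spec_create_HW len out) := by unfold Spec_create_HW; infer_instance

-- ===== CLAIM (what is proved, stated in full; the proofs are below) =====
def Claim_equal_create_HW : Prop := ∀ (len : Int), Dom_create_HW len → Spec_create_HW len (create_HW len)

-- ===== LEMMAS AND PROOFS =====

-- every char Nat.toDigitsCore 2 pushes is a binary digit
theorem pv_toDigitsCore_binary (fuel : Nat) : ∀ (n : Nat) (ds : List Char),
    (∀ c ∈ ds, c = '0' ∨ c = '1') → ∀ c ∈ Nat.toDigitsCore 2 fuel n ds, c = '0' ∨ c = '1' := by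
  induction fuel with
  | zero => intro n ds h c hc; exact h c (by simpa [Nat.toDigitsCore] using hc)
  | succ fuel ih =>
    intro n ds h c hc
    have hdig : (n % 2).digitChar = '0' ∨ (n % 2).digitChar = '1' := by
      have h2 : n % 2 = 0 ∨ n % 2 = 1 := by omega
      rcases h2 with h2 | h2 <;> rw [h2] <;> decide
    simp only [Nat.toDigitsCore] at hc
    by_cases hn : n / 2 = 0
    · simp only [hn, if_true] at hc
      rcases List.mem_cons.1 hc with h' | hc
      · rw [h']; exact hdig
      · exact h c hc
    · simp only [hn, if_false] at hc
      refine ih (n / 2) _ ?_ c hc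
      intro d hd
      rcases List.mem_cons.1 hd with h' | hd
      · rw [h']; exact hdig
      · exact h d hd

-- toDigitsCore never shrinks its accumulator
theorem pv_toDigitsCore_len (fuel : Nat) : ∀ (n : Nat) (ds : List Char),
    ds.length ≤ (Nat.toDigitsCore 2 fuel n ds).length := by
  induction fuel with
  | zero => intro n ds; simp [Nat.toDigitsCore]
  | succ fuel ih =>
    intro n ds
    simp only [Nat.toDigitsCore]
    by_cases hn : n / 2 = 0
    · simp [hn]
    · simp only [hn, if_false]
      calc ds.length ≤ (Nat.digitChar (n % 2) :: ds).length := by simp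
        _ ≤ _ := ih _ _

theorem pv_toDigits_ne_nil (n : Nat) : Nat.toDigits 2 n ≠ [] := by
  have h := pv_toDigitsCore_len n n [Nat.digitChar (n % 2)]
  have h2 := pv_toDigitsCore_len (n + 1) n []
  intro hcon
  simp only [Nat.toDigits] at hcon
  rw [show (n + 1) = n.succ from rfl, Nat.toDigitsCore] at hcon
  by_cases hn : n / 2 = 0
  · simp [hn] at hcon
  · simp only [hn, if_false] at hcon
    have := pv_toDigitsCore_len n (n / 2) [Nat.digitChar (n % 2)]
    rw [hcon] at this; simp at this

-- the chars of format(j,'04b') (j ≥ 0) are '0' or '1'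
theorem pv_fmt_binary (j : Int) (c : Char) (hc : c ∈ pvFmt04b j) (hj : 0 ≤ j) :
    c = '0' ∨ c = '1' := by
  simp only [pvFmt04b, PySem.Int.toBinChars, List.mem_append] at hc
  rw [if_neg (by omega)] at hc
  rcases hc with hc | hc
  · left; exact List.eq_of_mem_replicate hc
  · exact pv_toDigitsCore_binary _ _ _ (by simp) c hc

-- format(j,'04b') has length ≥ 2 (it is padded to width ≥ 4)
theorem pv_fmt_len (j : Int) (hj : 0 ≤ j) : 2 ≤ (pvFmt04b j).length := by
  simp only [pvFmt04b, PySem.Int.toBinChars, List.length_append, List.length_replicate]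
  rw [if_neg (by omega)]
  have h1 : 1 ≤ (Nat.toDigits 2 j.toNat).length :=
    List.length_pos_iff.mpr (pv_toDigits_ne_nil _)
  omega

-- A's int(s[k]) equals B's comparison-with-'1' on binary strings, for k = 0, 1
theorem pv_parse_eq (j : Int) (hj : 0 ≤ j) (i : Int) (hi0 : 0 ≤ i) (hi2 : i < 2) :
    (PySem.Int.ofChars? [PySem.List.pyGetD (pvFmt04b j) i ' ']).getD 0
      = (if PySem.List.pyGetD (pvFmt04b j) i ' ' = '1' then (1 : Int) else 0) := by
  have hlen := pv_fmt_len j hj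
  have hlt : i.toNat < (pvFmt04b j).length := by omega
  have hget : PySem.List.pyGetD (pvFmt04b j) i ' ' = (pvFmt04b j)[i.toNat] := by
    rw [PySem.List.pyGetD, PySem.List.pyGet?_of_nonneg _ hi0, List.getElem?_eq_getElem hlt]
    rfl
  have hmem : (pvFmt04b j)[i.toNat] ∈ pvFmt04b j := List.getElem_mem hlt
  rcases pv_fmt_binary j _ hmem hj with h | h <;> rw [hget, h] <;> decide

-- a fold appending one element to each of three accumulators is three maps
theorem pv_foldl_triple (f g h : Int → Int) (l : List Int) (a b c : List Int) :
    l.foldl (fun st j => (st.1 ++ [f j], st.2.1 ++ [g j], st.2.2 ++ [h j])) (a, b, c)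
      = (a ++ l.map f, b ++ l.map g, c ++ l.map h) := by
  induction l generalizing a b c with
  | nil => simp
  | cons x xs ih => simp [List.foldl_cons, ih]

-- the outer i-loop appends the same three rows once per iteration
theorem pv_foldl_tile (R1 R2 R3 : List Int) (l : List Int) (a b c : List Int) :
    l.foldl (fun (st : List Int × List Int × List Int) _i =>
        (st.1 ++ R1, st.2.1 ++ R2, st.2.2 ++ R3)) (a, b, c)
      = (a ++ (List.replicate l.length R1).flatten,
         b ++ (List.replicate l.length R2).flatten,
         c ++ (List.replicate l.length R3).flatten) := by
  induction l generalizing a b c with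
  | nil => simp
  | cons x xs ih => simp [List.foldl_cons, ih, List.replicate_succ, List.append_assoc]

-- ===== VERDICT (by name: the statement is the Claim_ definition above) =====
theorem create_HW_spec : Claim_equal_create_HW := by
  intro len _
  unfold Spec_create_HW
  simp only [create_HW, create_HW_alt]
  have hil : (PySem.List.pyRange 0 len 1).foldl (fun il i => il ++ [pvFmt04b i]) []
      = (PySem.List.pyRange 0 len 1).map pvFmt04b := by
    simpa using PySem.List.foldl_append_singleton_eq_map pvFmt04b (PySem.List.pyRange 0 len 1) []
  rw [hil]
  set R := PySem.List.pyRange 0 len 1 with hR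
  set fa : Int → Int := fun j => (PySem.Int.ofChars? [PySem.List.pyGetD (pvFmt04b j) 0 ' ']).getD 0 with hfa
  set fb : Int → Int := fun j => (PySem.Int.ofChars? [PySem.List.pyGetD (pvFmt04b j) 1 ' ']).getD 0 with hfb
  -- A's inner loop body, with il[j] rewritten to pvFmt04b j on range members
  have hinner : (fun (st : List Int × List Int × List Int) (_i : Int) =>
      R.foldl (fun st j =>
        (st.1 ++ [(PySem.Int.ofChars? [PySem.List.pyGetD (PySem.List.pyGetD (R.map pvFmt04b) j []) 0 ' ']).getD 0],
         st.2.1 ++ [(PySem.Int.ofChars? [PySem.List.pyGetD (PySem.List.pyGetD (R.map pvFmt04b) j []) 1 ' ']).getD 0],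
         st.2.2 ++ [my_and ((PySem.Int.ofChars? [PySem.List.pyGetD (PySem.List.pyGetD (R.map pvFmt04b) j []) 0 ' ']).getD 0)
                           ((PySem.Int.ofChars? [PySem.List.pyGetD (PySem.List.pyGetD (R.map pvFmt04b) j []) 1 ' ']).getD 0)])) st)
      = (fun st _i => (st.1 ++ R.map fa, st.2.1 ++ R.map fb, st.2.2 ++ R.map (fun j => PySem.Int.band (fa j) (fb j)))) := by
    funext st i
    obtain ⟨a, b, c⟩ := st
    rw [show R.foldl _ (a,b,c) = _ from pv_foldl_triple _ _ _ R a b c]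
    have hmem : ∀ j ∈ R, PySem.List.pyGetD (R.map pvFmt04b) j [] = pvFmt04b j := by
      intro j hj
      have := (PySem.List.mem_pyRange_one).1 (hR ▸ hj)
      exact PySem.List.pyGetD_map_pyRange_of_nonneg pvFmt04b len j [] this.1 this.2
    simp only [Prod.mk.injEq]
    refine ⟨by rw [List.map_congr_left (fun j hj => by rw [hmem j hj])],
            by rw [List.map_congr_left (fun j hj => by rw [hmem j hj])],
            by rw [List.map_congr_left (fun j hj => by rw [hmem j hj, my_and])]⟩
  rw [hinner, pv_foldl_tile]
  -- B's three projected rows are the three maps, pointwise equal to A's on range members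
  have hnn : ∀ j ∈ R, 0 ≤ j := fun j hj => ((PySem.List.mem_pyRange_one).1 (hR ▸ hj)).1
  have hga : R.map (fun j => (pvTopBits j).1) = R.map fa := by
    refine List.map_congr_left (fun j hj => ?_)
    have := pv_parse_eq j (hnn j hj) 0 (by omega) (by omega)
    simp only [pvTopBits, hfa]; rw [this]
  have hgb : R.map (fun j => (pvTopBits j).2) = R.map fb := by
    refine List.map_congr_left (fun j hj => ?_)
    have := pv_parse_eq j (hnn j hj) 1 (by omega) (by omega)
    simp only [pvTopBits, hfb]; rw [this]
  have hgab : R.map (fun j => (pvTopBits j).1 * (pvTopBits j).2)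
      = R.map (fun j => PySem.Int.band (fa j) (fb j)) := by
    refine List.map_congr_left (fun j hj => ?_)
    have h0 := pv_parse_eq j (hnn j hj) 0 (by omega) (by omega)
    have h1 := pv_parse_eq j (hnn j hj) 1 (by omega) (by omega)
    simp only [pvTopBits, hfa, hfb]
    rw [h0, h1]
    split_ifs <;> decide
  have hrep : ∀ xs : List Int, PySem.List.pyRepeat xs len = (List.replicate len.toNat xs).flatten := by
    intro xs; simp [PySem.List.pyRepeat]
  simp only [List.map_map, Function.comp_def]
  rw [hga, hgb, hgab]
  simp [hrep, PySem.List.length_pyRange_one, hR]
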